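-- pv_equiv track=rewrite | github.com/smiths73v3/zynthian-ui | zyngine/deconvolve.py | array_bounds
-- ===== SOURCE A (Python) =====
-- def array_bounds(data, threshold):
--     start = end = 0
--     # Scan from start
--     for i, value in enumerate(data):
--         if abs(value) > threshold:
--             start = i
--             break
--     # Scan from end
--     for i, value in enumerate(data[::-1]):
--         if abs(value) > threshold:
--             end = len(data) - i
--             break
--     return start, end
-- ===== SOURCE B (Python) =====
-- def array_bounds(data, threshold):
--     first = last = None
--     for i, value in enumerate(data):
--         if abs(value) > threshold:
--             if first is None:
--                 first = i
--             last = i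
--     return (first if first is not None else 0,
--             last + 1 if last is not None else 0)
-- ===== Notes on version B (the rewrite author's own statement) =====
-- stated objective: simpler
-- what changed: Replaces A's two separate break-scans (forward, and forward over a reversed copy) with one forward pass that tracks the first and last indices whose abs exceeds the threshold.
import Mathlib
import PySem

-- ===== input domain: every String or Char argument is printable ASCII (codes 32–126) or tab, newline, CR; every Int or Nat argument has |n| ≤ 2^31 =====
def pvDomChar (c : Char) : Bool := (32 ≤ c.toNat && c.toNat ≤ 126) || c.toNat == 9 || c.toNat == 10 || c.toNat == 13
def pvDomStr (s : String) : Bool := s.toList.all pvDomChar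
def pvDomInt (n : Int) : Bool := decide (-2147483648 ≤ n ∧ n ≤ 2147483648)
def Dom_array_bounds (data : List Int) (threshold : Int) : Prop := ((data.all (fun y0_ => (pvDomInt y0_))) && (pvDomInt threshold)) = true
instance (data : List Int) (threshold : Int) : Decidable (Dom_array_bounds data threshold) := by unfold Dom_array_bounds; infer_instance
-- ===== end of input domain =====

-- B replaces A's two break-scans (forward, and over a reversed copy) with one forward pass tracking first/last matching indices (objective: simpler).

-- ===== PORT A =====
-- first loop: 'for i, value in enumerate(data): if abs(value) > threshold: start = i; break'
def scanStartA : List Int → Int → Int → Int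
  | [], _, _ => 0
  | v :: r, t, i => if |v| > t then i else scanStartA r t (i + 1)

-- second loop over data[::-1]: on first match, end = len(data) - i
def scanEndA : List Int → Int → Int → Int → Int
  | [], _, _, _ => 0
  | v :: r, t, i, n => if |v| > t then n - i else scanEndA r t (i + 1) n

-- data[::-1] ported as List.reverse (exact for step -1 full slice)
def array_bounds (data : List Int) (threshold : Int) : Int × Int :=
  (scanStartA data threshold 0, scanEndA data.reverse threshold 0 (data.length : Int))

-- ===== PORT B =====
-- 'for i, value in enumerate(data)' with state (first, last), both Optional
def loopB : List Int → Int → Int → Option Int × Option Int → Option Int × Option Int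
  | [], _, _, s => s
  | v :: r, t, i, s =>
      loopB r t (i + 1)
        (if |v| > t then ((if s.1.isNone then some i else s.1), some i) else s)

def array_bounds_alt (data : List Int) (threshold : Int) : Int × Int :=
  let s := loopB data threshold 0 (none, none)
  ((match s.1 with | some f => f | none => 0),
   (match s.2 with | some l => l + 1 | none => 0))

-- ===== PRECONDITION & SPEC =====
def Spec_array_bounds (data : List Int) (threshold : Int) (out : Int × Int) : Prop := out = array_bounds_alt data threshold
instance (data : List Int) (threshold : Int) (out : Int × Int) : Decidable (Spec_array_bounds data threshold out) := by unfold Spec_array_bounds; infer_instance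

-- ===== CLAIM (what is proved, stated in full; the proofs are below) =====
def Claim_equal_array_bounds : Prop := ∀ (data : List Int) (threshold : Int), Dom_array_bounds data threshold → Spec_array_bounds data threshold (array_bounds data threshold)

-- ===== LEMMAS AND PROOFS =====

-- reference: index of the first match, starting at absolute index i
def fIdx (t : Int) : List Int → Int → Option Int
  | [], _ => none
  | v :: r, i => if |v| > t then some i else fIdx t r (i + 1)

-- reference: index of the last match
def lIdx (t : Int) : List Int → Int → Option Int
  | [], _ => none
  | v :: r, i =>
      match lIdx t r (i + 1) with
      | some j => some j
      | none => if |v| > t then some i else none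

theorem scanStartA_eq (t : Int) : ∀ (xs : List Int) (i : Int),
    scanStartA xs t i = (fIdx t xs i).getD 0 := by
  intro xs
  induction xs with
  | nil => intro i; simp [scanStartA, fIdx]
  | cons v r ih =>
      intro i
      simp only [scanStartA, fIdx]
      split <;> simp [ih]

theorem scanEndA_eq (t : Int) : ∀ (xs : List Int) (i n : Int),
    scanEndA xs t i n = (match fIdx t xs i with | none => 0 | some j => n - j) := by
  intro xs
  induction xs with
  | nil => intro i n; simp [scanEndA, fIdx]
  | cons v r ih =>
      intro i n
      simp only [scanEndA, fIdx]
      split <;> simp [ih]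

theorem fIdx_append (t : Int) : ∀ (l l' : List Int) (i : Int),
    fIdx t (l ++ l') i =
      (match fIdx t l i with | some j => some j | none => fIdx t l' (i + l.length)) := by
  intro l
  induction l with
  | nil => intro l' i; simp [fIdx]
  | cons v r ih =>
      intro l' i
      simp only [List.cons_append, fIdx]
      split
      · rfl
      · rw [ih]
        have : i + 1 + (r.length : Int) = i + ((r.length : Int) + 1) := by ring
        simp [this]

theorem lIdx_shift (t : Int) : ∀ (xs : List Int) (i k : Int),
    lIdx t xs (i + k) = (lIdx t xs i).map (· + k) := by
  intro xs
  induction xs with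
  | nil => intro i k; simp [lIdx]
  | cons v r ih =>
      intro i k
      simp only [lIdx]
      have : i + k + 1 = (i + 1) + k := by ring
      rw [this, ih]
      cases h : lIdx t r (i + 1) <;> simp

theorem fIdx_reverse (t : Int) : ∀ (xs : List Int),
    fIdx t xs.reverse 0 = (lIdx t xs 0).map (fun j => (xs.length : Int) - 1 - j) := by
  intro xs
  induction xs with
  | nil => simp [fIdx, lIdx]
  | cons v r ih =>
      simp only [List.reverse_cons]
      rw [fIdx_append t r.reverse [v] 0, ih]
      have hsh : lIdx t r (0 + 1) = (lIdx t r 0).map (· + 1) := lIdx_shift t r 0 1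
      simp only [lIdx, zero_add] at hsh ⊢
      rw [hsh]
      cases h : lIdx t r 0 with
      | some j =>
          simp [List.length_cons]
          ring
      | none =>
          simp only [Option.map_none]
          simp only [fIdx]
          split <;> simp [List.length_reverse]

theorem loopB_eq (t : Int) : ∀ (xs : List Int) (i : Int) (f? l? : Option Int),
    loopB xs t i (f?, l?) =
      ((match f? with | some f => some f | none => fIdx t xs i),
       (match lIdx t xs i with | some j => some j | none => l?)) := by
  intro xs
  induction xs with
  | nil => intro i f? l?; cases f? <;> cases l? <;> simp [loopB, fIdx, lIdx]
  | cons v r ih =>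
      intro i f? l?
      simp only [loopB, fIdx, lIdx]
      by_cases h : |v| > t
      · simp only [if_pos h]
        cases f? with
        | none =>
            simp only [Option.isNone_none, if_true]
            rw [ih]
            cases hl : lIdx t r (i + 1) <;> simp
        | some f =>
            simp only [Option.isNone_some]
            rw [ih]
            cases hl : lIdx t r (i + 1) <;> simp
      · simp only [if_neg h]
        rw [ih]
        cases hl : lIdx t r (i + 1) <;> simp

-- ===== VERDICT (by name: the statement is the Claim_ definition above) =====
theorem array_bounds_spec : Claim_equal_array_bounds := by
  intro data threshold _
  unfold Spec_array_bounds array_bounds array_bounds_alt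
  rw [loopB_eq, scanStartA_eq, scanEndA_eq, fIdx_reverse]
  have h1 : (fIdx threshold data 0).getD 0 =
      (match fIdx threshold data 0 with | some f => f | none => 0) := by
    cases fIdx threshold data 0 <;> rfl
  cases h : lIdx threshold data 0 with
  | none => simp [h1]
  | some j =>
      simp only [Option.map_some, Prod.mk.injEq]
      exact ⟨h1, by ring⟩
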